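-- pv_equiv track=rewrite | github.com/Al3xsandro/MC102 | labs/lab12-recursivo.py | contar_suspeitos
-- ===== SOURCE A (Python) =====
-- def contar_suspeitos(pistas, suspeitos):
--     principais_suspeitos = []
--     count = {}
--
--     for suspeito in suspeitos:
--         count[suspeito] = 0
--
--         for value in pistas:
--             if value in suspeitos[suspeito]:
--                 count[suspeito] += 1
--
--     max_matchs = max(count.values())
--     principais_suspeitos = [suspeito for suspeito, matchs in count.items() if matchs == max_matchs]
--
--     return principais_suspeitos
-- ===== SOURCE B (Python) =====
-- def contar_suspeitos(pistas, suspeitos):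
--     freq = {}
--     for value in pistas:
--         freq[value] = freq.get(value, 0) + 1
--     best = None
--     principais = []
--     for suspeito in suspeitos:
--         c = sum(freq.get(item, 0) for item in set(suspeitos[suspeito]))
--         if best is None or c > best:
--             best = c
--             principais = [suspeito]
--         elif c == best:
--             principais.append(suspeito)
--     return principais
-- ===== Notes on version B (the rewrite author's own statement) =====
-- stated objective: faster
-- what changed: B inverts the nested scan: it builds a frequency Counter over pistas once, computes each suspect's count as a sum of frequencies over the distinct items of his clue list (the inner scan over pistas disappears), and selects the winners in the same pass with a running maximum and list, instead of A's per-suspect membership loop plus a separate max-of-values pass and a final filtering comprehension.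
import Mathlib
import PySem

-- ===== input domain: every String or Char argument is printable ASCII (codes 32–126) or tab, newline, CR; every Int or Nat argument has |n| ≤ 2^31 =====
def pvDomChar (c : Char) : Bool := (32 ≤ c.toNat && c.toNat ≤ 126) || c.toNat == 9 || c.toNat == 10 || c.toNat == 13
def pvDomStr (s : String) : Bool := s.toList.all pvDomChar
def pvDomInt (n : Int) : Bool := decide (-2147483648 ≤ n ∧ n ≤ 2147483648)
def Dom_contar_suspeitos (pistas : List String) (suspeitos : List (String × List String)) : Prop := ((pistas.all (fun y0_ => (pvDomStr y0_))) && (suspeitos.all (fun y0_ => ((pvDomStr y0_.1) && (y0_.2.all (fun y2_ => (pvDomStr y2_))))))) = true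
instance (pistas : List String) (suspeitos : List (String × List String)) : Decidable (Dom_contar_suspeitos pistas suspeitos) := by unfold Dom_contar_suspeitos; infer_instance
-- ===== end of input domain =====

-- B inverts the scan: a frequency counter over pistas replaces the per-suspect inner scan, and the
-- winners are selected in the same pass with a running maximum (objective: asymptotically faster).

-- ===== PORT A =====
def pvCountA (pistas : List String) (suspeitos : List (String × List String)) : PySem.Dict String Int :=
  suspeitos.foldl
    (fun (d : PySem.Dict String Int) p =>
      pistas.foldl
        (fun d v => if p.2.contains v then d.insert p.1 (d.getD p.1 0 + 1) else d)
        (d.insert p.1 0))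
    PySem.Dict.empty

def contar_suspeitos (pistas : List String) (suspeitos : List (String × List String)) : List String :=
  let count := pvCountA pistas suspeitos
  match PySem.List.max? count.values id with
  | none => []  -- unreachable under Pre_ (Python raises ValueError on an empty dict)
  | some m => (count.items.filter (fun q => q.2 == m)).map (fun q => q.1)

-- ===== PORT B =====
-- freq[value] = freq.get(value, 0) + 1 over pistas
def pvFreqB (pistas : List String) : PySem.Dict String Int :=
  pistas.foldl (fun (d : PySem.Dict String Int) v => d.insert v (d.getD v 0 + 1)) PySem.Dict.empty

-- sum(freq.get(item, 0) for item in set(items))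
def pvCountB (freq : PySem.Dict String Int) (items : List String) : Int :=
  (PySem.Set.ofList items).foldl (fun (acc : Int) x => acc + freq.getD x 0) 0

def contar_suspeitos_alt (pistas : List String) (suspeitos : List (String × List String)) : List String :=
  let freq := pvFreqB pistas
  (suspeitos.foldl
    (fun (st : Option Int × List String) p =>
      let c := pvCountB freq p.2
      match st.1 with
      | none => (some c, [p.1])
      | some b =>
        if b < c then (some c, [p.1])
        else if c == b then (st.1, st.2 ++ [p.1])
        else st)
    (none, [])).2

-- ===== PRECONDITION & SPEC =====
-- Pre_ excludes the empty dict, where Python's max([]) raises ValueError in A, and association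
-- lists with duplicate keys, which do not represent a Python dict (the dict built from them
-- collapses duplicates before either function runs, so any value there is a marshalling artefact).
def Pre_contar_suspeitos (pistas : List String) (suspeitos : List (String × List String)) : Prop :=
  suspeitos ≠ [] ∧ (suspeitos.map Prod.fst).Nodup
instance (pistas : List String) (suspeitos : List (String × List String)) : Decidable (Pre_contar_suspeitos pistas suspeitos) := by unfold Pre_contar_suspeitos; infer_instance
def pvWitness_contar_suspeitos : List String × (List (String × List String)) :=
  (["x", "y"], [("a", ["x"]), ("b", ["x", "y"])])
def Spec_contar_suspeitos (pistas : List String) (suspeitos : List (String × List String)) (out : List String) : Prop := out = contar_suspeitos_alt pistas suspeitos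
instance (pistas : List String) (suspeitos : List (String × List String)) (out : List String) : Decidable (Spec_contar_suspeitos pistas suspeitos out) := by unfold Spec_contar_suspeitos; infer_instance

-- ===== CLAIM (what is proved, stated in full; the proofs are below) =====
def Claim_equal_contar_suspeitos : Prop := ∀ (pistas : List String) (suspeitos : List (String × List String)), Dom_contar_suspeitos pistas suspeitos → Pre_contar_suspeitos pistas suspeitos → Spec_contar_suspeitos pistas suspeitos (contar_suspeitos pistas suspeitos)

-- ===== LEMMAS AND PROOFS =====

-- A's inner loop only touches the key k it just initialised: it adds the number of matching clues.
theorem innerA_insert (P : String → Bool) (l : List String) (d : PySem.Dict String Int)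
    (k : String) (j : Int) :
    l.foldl (fun d v => if P v then d.insert k (d.getD k 0 + 1) else d) (d.insert k j)
      = d.insert k (j + (l.countP P : Int)) := by
  induction l generalizing j with
  | nil => simp
  | cons v l ih =>
    by_cases h : P v
    · simp only [List.foldl_cons, h, if_pos]
      rw [PySem.Dict.getD_insert_self, PySem.Dict.insert_insert_self, ih]
      rw [List.countP_cons, if_pos h]
      congr 1
      push_cast
      ring
    · simp only [List.foldl_cons, h, if_neg, Bool.false_eq_true, not_false_iff]
      rw [ih, List.countP_cons, if_neg (by simp [h])]
      simp

theorem maxInt_cons_cons (x y : Int) (l : List Int) :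
    PySem.List.max? (x :: y :: l) id = PySem.List.max? ((if x < y then y else x) :: l) id := by
  by_cases h : x < y <;> simp [PySem.List.max?, h]

theorem maxInt_cons_some : ∀ (l : List Int) (x : Int), ∃ m, PySem.List.max? (x :: l) id = some m := by
  intro l
  induction l with
  | nil => intro x; exact ⟨x, rfl⟩
  | cons y l ih =>
    intro x
    obtain ⟨m, hm⟩ := ih (if x < y then y else x)
    exact ⟨m, by rw [maxInt_cons_cons]; exact hm⟩

theorem maxInt_some_iff (xs : List Int) (m : Int) :
    PySem.List.max? xs id = some m ↔ m ∈ xs ∧ ∀ y ∈ xs, y ≤ m := by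
  constructor
  · intro h
    exact ⟨PySem.List.max?_mem h, fun y hy => PySem.List.max?_isMax h y hy⟩
  · rintro ⟨hm, hmax⟩
    cases xs with
    | nil => exact absurd hm (List.not_mem_nil)
    | cons x l =>
      obtain ⟨m', hm'⟩ := maxInt_cons_some l x
      have h1 : m' ≤ m := hmax m' (PySem.List.max?_mem hm')
      have h2 : m ≤ m' := PySem.List.max?_isMax hm' m hm
      rw [hm', le_antisymm h2 h1]

-- sum of the indicator of v over a duplicate-free list
theorem sum_indicator (S : List String) (v : String) (hS : S.Nodup) :
    (S.map (fun x => if x == v then (1 : Int) else 0)).sum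
      = if S.contains v then 1 else 0 := by
  induction S with
  | nil => simp
  | cons s S ih =>
    rcases List.nodup_cons.mp hS with ⟨hs, hS'⟩
    rw [List.map_cons, List.sum_cons, ih hS']
    by_cases h : s = v
    · subst h
      have hc : S.contains s = false := by simpa using hs
      simp [hc, hs]
    · have hsv : (s == v) = false := beq_eq_false_iff_ne.mpr h
      have hvs : (v == s) = false := beq_eq_false_iff_ne.mpr (fun he => h he.symm)
      have hc : (s :: S).contains v = S.contains v := by
        rw [List.contains_cons, hvs, Bool.false_or]
      rw [hc, hsv]
      simp

-- summing pistas-frequencies over the distinct clue items equals A's membership count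
theorem sum_counts (S : List String) (hS : S.Nodup) :
    ∀ (l : List String),
      (S.map (fun x => (l.count x : Int))).sum = (l.countP (fun v => S.contains v) : Int) := by
  intro l
  induction l with
  | nil => simp
  | cons v l ih =>
    have hcount : (S.map (fun x => ((v :: l).count x : Int))).sum
        = (S.map (fun x => (l.count x : Int))).sum
          + (S.map (fun x => if v == x then (1 : Int) else 0)).sum := by
      rw [← List.sum_map_add]
      apply congrArg List.sum
      apply List.map_congr_left
      intro x _
      rw [List.count_cons]
      push_cast
      ring
    have hflip : (S.map (fun x => if v == x then (1 : Int) else 0)).sum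
        = (S.map (fun x => if x == v then (1 : Int) else 0)).sum := by
      apply congrArg List.sum
      apply List.map_congr_left
      intro x _
      by_cases hx : x = v
      · simp [hx]
      · simp [hx, Ne.symm hx]
    rw [hcount, ih, hflip, sum_indicator S v hS, List.countP_cons]
    by_cases h : S.contains v <;> simp [h]

-- B's per-suspect sum equals A's per-suspect count
theorem countB_eq (pistas : List String) (items : List String) :
    pvCountB (pvFreqB pistas) items = (pistas.countP (fun v => items.contains v) : Int) := by
  unfold pvCountB pvFreqB
  rw [PySem.List.foldl_add]
  have h1 : ∀ x, (pistas.foldl (fun (d : PySem.Dict String Int) v => d.insert v (d.getD v 0 + 1))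
      PySem.Dict.empty).getD x 0 = (pistas.count x : Int) := by
    intro x
    rw [PySem.Dict.getD_foldl_insert_add_one, PySem.Dict.getD_empty]
    simp
  have h2 : (PySem.Set.ofList items).map
        (fun x => (pistas.foldl (fun (d : PySem.Dict String Int) v => d.insert v (d.getD v 0 + 1))
          PySem.Dict.empty).getD x 0)
      = (PySem.Set.ofList items).map (fun x => (pistas.count x : Int)) := by
    exact List.map_congr_left (fun x _ => h1 x)
  rw [h2, sum_counts (PySem.Set.ofList items) (PySem.Set.nodup_ofList items) pistas]
  have hfun : (fun v => (PySem.Set.ofList items).contains v) = (fun v => items.contains v) :=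
    funext (fun v => by simp [PySem.Set.mem_ofList])
  rw [zero_add]
  exact_mod_cast congrArg (fun p => List.countP p pistas) hfun

-- the running-max step, on precomputed (name, count) pairs
def pvStep (st : Option Int × List String) (q : String × Int) : Option Int × List String :=
  match st.1 with
  | none => (some q.2, [q.1])
  | some b =>
    if b < q.2 then (some q.2, [q.1])
    else if q.2 == b then (st.1, st.2 ++ [q.1])
    else st

def pvMaxFold (qs : List (String × Int)) (b : Int) : Int :=
  qs.foldl (fun a q => max a q.2) b

theorem le_pvMaxFold : ∀ (qs : List (String × Int)) (b : Int), b ≤ pvMaxFold qs b := by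
  intro qs
  induction qs with
  | nil => intro b; simp [pvMaxFold]
  | cons q qs ih =>
    intro b
    calc b ≤ max b q.2 := le_max_left _ _
      _ ≤ pvMaxFold qs (max b q.2) := ih _
      _ = pvMaxFold (q :: qs) b := rfl

theorem pvMaxFold_ub : ∀ (qs : List (String × Int)) (b : Int), ∀ q ∈ qs, q.2 ≤ pvMaxFold qs b := by
  intro qs
  induction qs with
  | nil => intro b q hq; exact absurd hq List.not_mem_nil
  | cons q0 qs ih =>
    intro b q hq
    rcases List.mem_cons.mp hq with h | h
    · subst h
      calc q.2 ≤ max b q.2 := le_max_right _ _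
        _ ≤ pvMaxFold qs (max b q.2) := le_pvMaxFold _ _
    · exact ih (max b q0.2) q h

theorem pvMaxFold_mem : ∀ (qs : List (String × Int)) (b : Int),
    pvMaxFold qs b = b ∨ pvMaxFold qs b ∈ qs.map Prod.snd := by
  intro qs
  induction qs with
  | nil => intro b; left; rfl
  | cons q qs ih =>
    intro b
    rcases ih (max b q.2) with h | h
    · by_cases hb : b < q.2
      · right
        have : pvMaxFold (q :: qs) b = q.2 := by
          show pvMaxFold qs (max b q.2) = q.2
          rw [h, max_eq_right (le_of_lt hb)]
        rw [this]; simp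
      · left
        show pvMaxFold qs (max b q.2) = b
        rw [h, max_eq_left (not_lt.mp hb)]
    · right
      exact List.mem_map.mpr (by
        rcases List.mem_map.mp h with ⟨x, hx, hxe⟩
        exact ⟨x, List.mem_cons_of_mem q hx, hxe⟩)

-- the running-max fold, characterised: the kept list is exactly the max-count names, in order
theorem runFold : ∀ (qs : List (String × Int)) (b : Int) (r : List String),
    qs.foldl pvStep (some b, r)
      = (some (pvMaxFold qs b),
         (if b = pvMaxFold qs b then r else [])
           ++ (qs.filter (fun q => q.2 == pvMaxFold qs b)).map Prod.fst) := by
  intro qs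
  induction qs with
  | nil => intro b r; simp [pvMaxFold]
  | cons q qs ih =>
    intro b r
    have hM : pvMaxFold (q :: qs) b = pvMaxFold qs (max b q.2) := rfl
    rcases lt_trichotomy b q.2 with hb | hb | hb
    · -- strictly greater: reset
      have hstep : pvStep (some b, r) q = (some q.2, [q.1]) := by
        simp [pvStep, hb]
      have hmax : max b q.2 = q.2 := max_eq_right (le_of_lt hb)
      have hMq : pvMaxFold (q :: qs) b = pvMaxFold qs q.2 := by
        show pvMaxFold qs (max b q.2) = _
        rw [hmax]
      have hbne : b ≠ pvMaxFold qs q.2 := by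
        intro he
        have h2 : q.2 ≤ b := by rw [he]; exact le_pvMaxFold qs q.2
        exact absurd hb (not_lt.mpr h2)
      rw [List.foldl_cons, hstep, ih q.2 [q.1], hMq, if_neg hbne, List.filter_cons]
      by_cases hq : q.2 = pvMaxFold qs q.2
      · rw [← hq]
        simp
      · simp [hq]
    · -- equal: append
      have hstep : pvStep (some b, r) q = (some b, r ++ [q.1]) := by
        have h1 : ¬ b < q.2 := by rw [hb]; exact lt_irrefl q.2
        have h2 : (q.2 == b) = true := by simp [hb]
        simp [pvStep, h1, h2]
      have hMb : pvMaxFold (q :: qs) b = pvMaxFold qs b := by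
        show pvMaxFold qs (max b q.2) = _
        rw [← hb, max_self]
      rw [List.foldl_cons, hstep, ih b (r ++ [q.1]), hMb, List.filter_cons]
      by_cases hbM : b = pvMaxFold qs b
      · have hcond : (q.2 == b) = true := by simp [hb]
        rw [← hbM]
        simp [hcond]
      · have hcond : (q.2 == pvMaxFold qs b) = false := by
          rw [← hb]; exact beq_eq_false_iff_ne.mpr hbM
        rw [hcond]
        simp [hbM]
    · -- strictly smaller: skip
      have hstep : pvStep (some b, r) q = (some b, r) := by
        have h1 : ¬ b < q.2 := not_lt.mpr (le_of_lt hb)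
        have h2 : (q.2 == b) = false := beq_eq_false_iff_ne.mpr (ne_of_lt hb)
        simp [pvStep, h1, h2]
      have hMb : pvMaxFold (q :: qs) b = pvMaxFold qs b := by
        show pvMaxFold qs (max b q.2) = _
        rw [max_eq_left (le_of_lt hb)]
      have hqne : (q.2 == pvMaxFold qs b) = false := by
        have : q.2 < pvMaxFold qs b := lt_of_lt_of_le hb (le_pvMaxFold qs b)
        exact beq_eq_false_iff_ne.mpr (ne_of_lt this)
      rw [List.foldl_cons, hstep, ih b r, hMb, List.filter_cons, hqne]
      simp

-- ===== VERDICT (by name: the statement is the Claim_ definition above) =====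
theorem contar_suspeitos_spec : Claim_equal_contar_suspeitos := by
  intro pistas suspeitos _ hpre
  obtain ⟨hne, hnd⟩ := hpre
  unfold Spec_contar_suspeitos contar_suspeitos contar_suspeitos_alt
  set cntf : String × List String → Int :=
    fun p => (pistas.countP (fun v => p.2.contains v) : Int) with hcntf
  -- A side: the count dict is literally the list of (name, count) pairs
  have hACount : pvCountA pistas suspeitos
      = suspeitos.foldl (fun (d : PySem.Dict String Int) p => d.insert p.1 (cntf p))
          PySem.Dict.empty := by
    unfold pvCountA
    have hAstep : (fun (d : PySem.Dict String Int) (p : String × List String) =>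
        pistas.foldl (fun d v => if p.2.contains v then d.insert p.1 (d.getD p.1 0 + 1) else d)
          (d.insert p.1 0))
        = fun d p => d.insert p.1 (cntf p) := by
      funext d p
      rw [innerA_insert _ pistas d p.1 0, zero_add]
    rw [hAstep]
  have hAitems : (pvCountA pistas suspeitos).items
      = suspeitos.map (fun p => (p.1, cntf p)) := by
    rw [hACount, PySem.Dict.items_foldl_insert_fresh suspeitos Prod.fst cntf PySem.Dict.empty
      (fun a _ => PySem.Dict.contains_empty a.1) hnd]
    simp [PySem.Dict.empty]
  have hAvalues : (pvCountA pistas suspeitos).values = suspeitos.map cntf := by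
    simp [PySem.Dict.values, hAitems, List.map_map, Function.comp]
  -- B side: rewrite the fold as pvStep over the (name, count) pairs
  have hBfold : suspeitos.foldl
      (fun (st : Option Int × List String) p =>
        let c := pvCountB (pvFreqB pistas) p.2
        match st.1 with
        | none => (some c, [p.1])
        | some b =>
          if b < c then (some c, [p.1])
          else if c == b then (st.1, st.2 ++ [p.1])
          else st)
      (none, [])
      = (suspeitos.map (fun p => (p.1, cntf p))).foldl pvStep (none, []) := by
    rw [List.foldl_map]
    apply PySem.List.foldl_congr_mem
    intro st p _
    have hc : pvCountB (pvFreqB pistas) p.2 = cntf p := countB_eq pistas p.2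
    simp only [hc, pvStep]
  -- now split off the first suspect and apply the running-max characterisation
  cases suspeitos with
  | nil => exact absurd rfl hne
  | cons p0 rest =>
    simp only [hBfold, List.map_cons, List.foldl_cons]
    have hstep0 : pvStep (none, []) (p0.1, cntf p0) = (some (cntf p0), [p0.1]) := rfl
    rw [hstep0, runFold (rest.map (fun p => (p.1, cntf p))) (cntf p0) [p0.1]]
    -- the maximum both sides select
    set qrest := rest.map (fun p => (p.1, cntf p)) with hqrest
    set M := pvMaxFold qrest (cntf p0) with hMdef
    have hvals : (pvCountA pistas (p0 :: rest)).values = cntf p0 :: qrest.map Prod.snd := by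
      rw [hAvalues]
      simp [hqrest, List.map_map, Function.comp_def]
    have hAmax : PySem.List.max? (pvCountA pistas (p0 :: rest)).values id = some M := by
      rw [hvals, maxInt_some_iff]
      constructor
      · rcases pvMaxFold_mem qrest (cntf p0) with h | h
        · rw [← hMdef] at h; rw [h]; exact List.mem_cons_self
        · exact List.mem_cons_of_mem _ h
      · intro y hy
        rcases List.mem_cons.mp hy with h | h
        · rw [h]; exact le_pvMaxFold _ _
        · rcases List.mem_map.mp h with ⟨q, hq, hqe⟩
          rw [← hqe]; exact pvMaxFold_ub qrest (cntf p0) q hq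
    rw [hAmax, hAitems]
    -- both sides are the max-count names in order
    simp only [List.map_cons, List.filter_cons]
    by_cases h0 : cntf p0 = M
    · rw [if_pos h0, if_pos (by simp [h0])]
      simp [hqrest, List.filter_map, List.map_map, Function.comp_def]
    · rw [if_neg h0, if_neg (by simp [h0])]
      simp [hqrest, List.filter_map, List.map_map, Function.comp_def]
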